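-- pv_equiv track=rewrite | github.com/dogunyoye/advent-of-code-2016 | day18/day18.py | __calculate
-- ===== SOURCE A (Python) =====
-- def __create_floor_plan(first_row) -> dict:
--     floor_plan = {}
--     for i in range(0, len(first_row)):
--         floor_plan[(0, i)] = first_row[i]
--     return floor_plan
--
-- def trap_check(neighbours, floor_plan) -> int:
--     count = 0
--     left, centre, right = neighbours[0], neighbours[1], neighbours[2]
--
--     if (left in floor_plan and floor_plan[left] == "^") and floor_plan[centre] == "^" and (
--             right not in floor_plan or floor_plan[right] == "."):
--         count += 1
--     if floor_plan[centre] == "^" and (right in floor_plan and floor_plan[right] == "^") and (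
--             left not in floor_plan or floor_plan[left] == "."):
--         count += 1
--     if (left in floor_plan and floor_plan[left] == "^") and floor_plan[centre] == "." and (
--             right not in floor_plan or floor_plan[right] == "."):
--         count += 1
--     if (right in floor_plan and floor_plan[right] == "^") and floor_plan[centre] == "." and (
--             left not in floor_plan or floor_plan[left] == "."):
--         count += 1
--
--     return count
--
-- def __calculate(data, rows) -> int:
--     floor_plan = __create_floor_plan(data.splitlines()[0])
--     length = len(data.splitlines()[0])
--     adjacent = [(-1, -1), (-1, 0), (-1, 1)]
--     result = 0
--
--     for i in range(1, rows):
--         for j in range(0, length):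
--             position = (i, j)
--             neighbours = []
--             for a in adjacent:
--                 neighbours.append((position[0] + a[0], position[1] + a[1]))
--
--             count = trap_check(neighbours, floor_plan)
--             if count == 1:
--                 floor_plan[position] = "^"
--             else:
--                 floor_plan[position] = "."
--
--         for k in range(0, length):
--             if floor_plan[(i-1, k)] == ".":
--                 result += 1
--             del floor_plan[(i-1, k)]
--
--     for v in floor_plan.values():
--         if v == ".":
--             result += 1
--
--     return result
-- ===== SOURCE B (Python) =====
-- def __calculate(data, rows):
--     # Bit-parallel simulation: each floor row is a pair of bitmasks (traps, safes);
--     # the whole next row is computed at once with shifts and XOR, '.'-cells counted by popcount.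
--     row0 = data.splitlines()[0]
--     n = len(row0)
--     T = 0  # bit j set iff cell j is '^'
--     S = 0  # bit j set iff cell j is '.'
--     for c in reversed(row0):
--         T = T * 2 + (c == '^')
--         S = S * 2 + (c == '.')
--     mask = (1 << n) - 1
--     top = (1 << (n - 1)) if n else 0
--     result = bin(S).count('1')
--     for _ in range(1, rows):
--         lT = (T << 1) & mask         # trap to the left  (edge reads as safe)
--         lS = ((S << 1) | 1) & mask   # safe to the left
--         rT = T >> 1                  # trap to the right
--         rS = (S >> 1) | top          # safe to the right
--         T = (S | T) & ((lT & rS) ^ (rT & lS)) & mask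
--         S = mask ^ T
--         result += n - bin(T).count('1')
--     return result
-- ===== Notes on version B (the rewrite author's own statement) =====
-- stated objective: faster
-- what changed: Replaces the (row,col)-keyed dict cell-by-cell simulation with a bit-parallel one: each floor row is a pair of integer bitmasks (trap cells, safe cells), the whole next row is computed at once by shift/AND/XOR word operations, and safe cells are counted with popcount (bin().count('1')).
import Mathlib
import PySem

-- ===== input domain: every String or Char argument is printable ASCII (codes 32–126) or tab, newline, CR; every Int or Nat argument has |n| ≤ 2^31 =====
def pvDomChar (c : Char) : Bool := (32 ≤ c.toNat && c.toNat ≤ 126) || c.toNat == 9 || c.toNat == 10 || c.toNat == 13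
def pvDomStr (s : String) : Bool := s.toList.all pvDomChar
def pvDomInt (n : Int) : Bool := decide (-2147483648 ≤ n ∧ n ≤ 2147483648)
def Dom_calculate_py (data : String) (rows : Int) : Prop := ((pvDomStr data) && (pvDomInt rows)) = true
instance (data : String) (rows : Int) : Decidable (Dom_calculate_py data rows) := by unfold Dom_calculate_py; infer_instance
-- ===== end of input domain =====

-- B replaces A's (row,col)-keyed dict simulation by a bit-parallel one: each row is a pair of
-- bitmasks (traps, safes), the next row is one shift/AND/XOR formula, '.'-cells are counted by popcount.

-- ===== PORT A =====
-- __create_floor_plan: the dict's values are the row's one-character strings, modelled as Char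
def createFloorPlan (firstRow : String) : PySem.Dict (Int × Int) Char :=
  (PySem.List.pyRange 0 (PySem.Str.len firstRow)).foldl
    (fun fp i => fp.insert (0, i) ((PySem.Str.pyGet? firstRow i).getD ' '))   -- index i always in range here
    ⟨[]⟩

-- trap_check; fp[centre] is ported with default ' ' — centre is always a present key at every call site
def trapCheck (neighbours : List (Int × Int)) (fp : PySem.Dict (Int × Int) Char) : Int :=
  let count : Int := 0
  let left := (PySem.List.pyGet? neighbours 0).getD (0, 0)     -- indices 0,1,2 in range at every call
  let centre := (PySem.List.pyGet? neighbours 1).getD (0, 0)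
  let right := (PySem.List.pyGet? neighbours 2).getD (0, 0)
  let count := if (fp.contains left && fp.getD left ' ' == '^') && fp.getD centre ' ' == '^'
                  && (!fp.contains right || fp.getD right ' ' == '.') then count + 1 else count
  let count := if fp.getD centre ' ' == '^' && (fp.contains right && fp.getD right ' ' == '^')
                  && (!fp.contains left || fp.getD left ' ' == '.') then count + 1 else count
  let count := if (fp.contains left && fp.getD left ' ' == '^') && fp.getD centre ' ' == '.'
                  && (!fp.contains right || fp.getD right ' ' == '.') then count + 1 else count
  let count := if (fp.contains right && fp.getD right ' ' == '^') && fp.getD centre ' ' == '.'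
                  && (!fp.contains left || fp.getD left ' ' == '.') then count + 1 else count
  count

def calculate_py (data : String) (rows : Int) : Int :=
  let firstRow := ((PySem.List.pyGet? (PySem.Str.splitlines data) 0).getD "")   -- Pre_: splitlines data ≠ [], so index 0 exists
  let floorPlan := createFloorPlan firstRow
  let length : Int := PySem.Str.len firstRow
  let adjacent : List (Int × Int) := [(-1, -1), (-1, 0), (-1, 1)]
  let st := (PySem.List.pyRange 1 rows).foldl
    (fun (st : PySem.Dict (Int × Int) Char × Int) i =>
      let fp := (PySem.List.pyRange 0 length).foldl (fun fp j =>
          let position : Int × Int := (i, j)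
          let neighbours := adjacent.foldl (fun ns a => ns ++ [(position.1 + a.1, position.2 + a.2)]) []
          let count := trapCheck neighbours fp
          if count == 1 then fp.insert position '^' else fp.insert position '.') st.1
      let rf := (PySem.List.pyRange 0 length).foldl (fun (rf : Int × PySem.Dict (Int × Int) Char) k =>
          ((if rf.2.getD (i - 1, k) ' ' == '.' then rf.1 + 1 else rf.1), rf.2.erase (i - 1, k))) (st.2, fp)
      (rf.2, rf.1))
    (floorPlan, 0)
  st.1.values.foldl (fun r v => if v == '.' then r + 1 else r) st.2

-- ===== PORT B =====
-- ports Python's bin(m).count('1'): the number of 1-bits of a nonnegative integer (exact)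
def popcount (m : Nat) : Nat :=
  if h : m = 0 then 0 else m % 2 + popcount (m / 2)
termination_by m
decreasing_by exact Nat.div_lt_self (Nat.pos_of_ne_zero h) (by norm_num)

-- Python's nonnegative ints incl. their bit operations are modelled by Nat (<<, >>, &, |, ^ are exact);
-- `mask ^ T` in Source B is Python's `mask ^ T` on nonnegative ints
def calculate_py_alt (data : String) (rows : Int) : Int :=
  let row0 := ((PySem.List.pyGet? (PySem.Str.splitlines data) 0).getD "").toList   -- Pre_: a first line exists
  let n := row0.length
  let TS := row0.reverse.foldl
      (fun (TS : Nat × Nat) c =>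
        (2 * TS.1 + (if c == '^' then 1 else 0), 2 * TS.2 + (if c == '.' then 1 else 0))) (0, 0)
  let st := (PySem.List.pyRange 1 rows).foldl
      (fun (st : Nat × Nat × Int) _ =>
        let T := st.1
        let S := st.2.1
        let lT := (T <<< 1) &&& ((1 <<< n) - 1)
        let lS := ((S <<< 1) ||| 1) &&& ((1 <<< n) - 1)
        let rT := T >>> 1
        let rS := (S >>> 1) ||| (if n ≠ 0 then 1 <<< (n - 1) else 0)
        let T' := ((S ||| T) &&& ((lT &&& rS) ^^^ (rT &&& lS))) &&& ((1 <<< n) - 1)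
        (T', ((1 <<< n) - 1) ^^^ T', st.2.2 + ((n : Int) - (popcount T' : Int))))
      (TS.1, TS.2, ((popcount TS.2 : Nat) : Int))
  st.2.2

-- ===== PRECONDITION & SPEC =====
-- Pre_ excludes exactly the inputs where A raises IndexError: data with no line at all (the empty string).
def Pre_calculate_py (data : String) (rows : Int) : Prop := PySem.Str.splitlines data ≠ []
instance (data : String) (rows : Int) : Decidable (Pre_calculate_py data rows) := by unfold Pre_calculate_py; infer_instance
def pvWitness_calculate_py : String × Int := (".^^.^", 4)

def Spec_calculate_py (data : String) (rows : Int) (out : Int) : Prop := out = calculate_py_alt data rows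
instance (data : String) (rows : Int) (out : Int) : Decidable (Spec_calculate_py data rows out) := by unfold Spec_calculate_py; infer_instance

-- ===== CLAIM (what is proved, stated in full; the proofs are below) =====
def Claim_equal_calculate_py : Prop := ∀ (data : String) (rows : Int), Dom_calculate_py data rows → Pre_calculate_py data rows → Spec_calculate_py data rows (calculate_py data rows)

-- ===== LEMMAS AND PROOFS =====

-- the intermediate, proof-side row-list simulation both ports are reduced to
def nextRow (row : List Char) : List Char :=
  let n := row.length
  (List.range n).foldl (fun out j =>
    let left := if 0 < j then row.getD (j - 1) ' ' else '.'
    let right := if j < n - 1 then row.getD (j + 1) ' ' else '.'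
    let c := row.getD j ' '
    let trap := (c == '.' || c == '^') &&
      (((left == '^') && (right == '.')) != ((right == '^') && (left == '.')))
    out ++ [if trap then '^' else '.']) []

-- the association list holding one floor row i, cells j, j+1, …
def rowItems (i j : Int) : List Char → List ((Int × Int) × Char)
  | [] => []
  | c :: rest => ((i, j), c) :: rowItems i (j + 1) rest

-- trap_check's count as a pure function of the three neighbour characters ('.' meaning absent/safe)
def pureCount (l c r : Char) : Int :=
  (if ((l == '^') && (c == '^')) && (r == '.') then 1 else 0)
  + (if ((c == '^') && (r == '^')) && (l == '.') then 1 else 0)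
  + (if ((l == '^') && (c == '.')) && (r == '.') then 1 else 0)
  + (if ((r == '^') && (c == '.')) && (l == '.') then 1 else 0)

lemma trapCheck_eq_pureCount (fp : PySem.Dict (Int × Int) Char) (left centre right : Int × Int)
    (c : Char) (hc : fp.get? centre = some c) :
    trapCheck [left, centre, right] fp
      = pureCount ((fp.get? left).getD '.') c ((fp.get? right).getD '.') := by
  cases hl : fp.get? left <;> cases hr : fp.get? right <;>
   simp [trapCheck, pureCount, PySem.List.pyGet?, PySem.List.pyIdx?,
         PySem.Dict.contains_eq_isSome_get?, PySem.Dict.getD_eq_get?_getD, hl, hr, hc] <;>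
   (split_ifs <;> omega)

lemma pureCount_one (l c r : Char) :
    (pureCount l c r == 1)
      = ((c == '.' || c == '^') && (((l == '^') && (r == '.')) != ((r == '^') && (l == '.')))) := by
  by_cases hl : l = '^' <;> by_cases hl2 : l = '.' <;> by_cases hc : c = '^' <;> by_cases hc2 : c = '.' <;>
    by_cases hr : r = '^' <;> by_cases hr2 : r = '.' <;>
    simp_all [pureCount] <;>
    rw [show (l == '^') = false by simpa using hl, show (r == '^') = false by simpa using hr,
        show (l == '.') = false by simpa using hl2, show (r == '.') = false by simpa using hr2]

lemma get?_rowItems_append (i : Int) (row : List Char) (tail : List ((Int × Int) × Char))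
    (j : Int) (a b : Int) :
    (PySem.Dict.mk (rowItems i j row ++ tail) : PySem.Dict (Int × Int) Char).get? (a, b)
      = if a = i ∧ j ≤ b ∧ b < j + row.length
        then some (row.getD (b - j).toNat ' ')
        else (PySem.Dict.mk tail : PySem.Dict (Int × Int) Char).get? (a, b) := by
  induction row generalizing j with
  | nil => rw [rowItems, List.nil_append, if_neg]; rintro ⟨h1, h2, h3⟩; simp at h3; omega
  | cons c rest ih =>
    rw [rowItems, List.cons_append, PySem.Dict.get?_mk_cons, ih]
    by_cases hab : (a, b) = ((i, j) : Int × Int)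
    · have h1 : a = i := by simpa using congrArg Prod.fst hab
      have h2 : b = j := by simpa using congrArg Prod.snd hab
      subst h1; subst h2
      rw [if_pos (by rw [beq_iff_eq]), if_pos (by refine ⟨rfl, le_refl _, by simp⟩)]
      simp
    · have : ((i, j) == (a, b)) = false := by
        simp only [beq_eq_false_iff_ne]; exact fun h => hab (by rw [h])
      rw [this]; simp only [Bool.false_eq_true, if_false]
      by_cases hc : a = i ∧ j + 1 ≤ b ∧ b < j + 1 + rest.length
      · rw [if_pos hc, if_pos (by simp at hc ⊢; omega)]
        have h5 : (b - j).toNat = (b - (j+1)).toNat + 1 := by omega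
        simp [h5]
      · rw [if_neg hc, if_neg (by
          rintro ⟨h1, h2, h3⟩
          apply hc
          refine ⟨h1, ?_, by simp at h3 ⊢; omega⟩
          rcases lt_or_eq_of_le h2 with h | h
          · omega
          · exfalso; exact hab (by rw [h1, h]))]

lemma rowItems_fst_mem (i j : Int) (row : List Char) (p) (hp : p ∈ rowItems i j row) :
    ∃ t : Nat, t < row.length ∧ p.1 = (i, j + t) := by
  induction row generalizing j with
  | nil => simp [rowItems] at hp
  | cons c rest ih =>
    rw [rowItems, List.mem_cons] at hp
    rcases hp with h | h
    · exact ⟨0, by simp, by simp [h]⟩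
    · obtain ⟨t, ht, hp⟩ := ih (j + 1) h
      exact ⟨t + 1, by simpa using ht, by rw [hp]; norm_num; ring⟩

lemma rowItems_append_singleton (i j : Int) (xs : List Char) (x : Char) :
    rowItems i j (xs ++ [x]) = rowItems i j xs ++ [((i, j + xs.length), x)] := by
  induction xs generalizing j with
  | nil => simp [rowItems]
  | cons c rest ih => simp [rowItems, ih]; ring_nf

lemma values_rowItems (i j : Int) (row : List Char) :
    (rowItems i j row).map (·.2) = row := by
  induction row generalizing j with
  | nil => rfl
  | cons c rest ih => simp [rowItems, ih]

lemma nextRow_eq_map (row : List Char) :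
    nextRow row = (List.range row.length).map (fun j =>
      let left := if 0 < j then row.getD (j - 1) ' ' else '.'
      let right := if j < row.length - 1 then row.getD (j + 1) ' ' else '.'
      let c := row.getD j ' '
      if (c == '.' || c == '^') &&
          (((left == '^') && (right == '.')) != ((right == '^') && (left == '.')))
      then '^' else '.') := by
  have hflat : ∀ (l : List Nat) (g : Nat → Char), (l.map (fun x => [g x])).flatten = l.map g := by
    intro l g; induction l with
    | nil => rfl
    | cons a t ih => simp_all
  simp [nextRow]
  rw [hflat]

lemma nextRow_length (row : List Char) : (nextRow row).length = row.length := by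
  rw [nextRow_eq_map]; simp

-- B's cell rule as a function (proof-side only)
def bcell (row : List Char) (j : Nat) : Char :=
  let left := if 0 < j then row.getD (j - 1) ' ' else '.'
  let right := if j < row.length - 1 then row.getD (j + 1) ' ' else '.'
  let c := row.getD j ' '
  if (c == '.' || c == '^') &&
      (((left == '^') && (right == '.')) != ((right == '^') && (left == '.')))
  then '^' else '.'

lemma nextRow_eq_map_bcell (row : List Char) :
    nextRow row = (List.range row.length).map (bcell row) := by
  rw [nextRow_eq_map]; rfl

lemma rowItems_eq_map (i j : Int) (row : List Char) :
    rowItems i j row = (List.range row.length).map (fun (t : Nat) => ((i, j + (t : Int)), row.getD t ' ')) := by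
  induction row generalizing j with
  | nil => rfl
  | cons c rest ih =>
    rw [rowItems, ih, List.length_cons, List.range_succ_eq_map]
    simp only [List.map_cons, List.map_map]
    refine congrArg₂ _ (by norm_num) ?_
    apply List.map_congr_left
    intro t _
    refine congrArg₂ _ ?_ rfl
    refine congrArg₂ _ rfl ?_
    push_cast
    ring

lemma createFloorPlan_eq (s : String) :
    createFloorPlan s = PySem.Dict.mk (rowItems 0 0 s.toList) := by
  apply PySem.Dict.ext
  rw [createFloorPlan]
  have hlen : PySem.Str.len s = (s.toList.length : Int) := by simp
  rw [hlen, PySem.List.pyRange_zero_natCast]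
  rw [show (⟨[]⟩ : PySem.Dict (Int × Int) Char) = PySem.Dict.empty from rfl]
  rw [PySem.Dict.items_foldl_insert_fresh _
        (fun i => ((0 : Int), i)) (fun i => (PySem.Str.pyGet? s i).getD ' ') PySem.Dict.empty
        (fun a _ => PySem.Dict.contains_empty _)
        (by
          refine List.Nodup.map ?_ (List.Nodup.map ?_ (List.nodup_range))
          · intro x y h; simpa using h
          · intro x y h; exact Nat.cast_injective h)]
  rw [rowItems_eq_map]
  simp
  apply List.map_congr_left
  intro t ht
  simp at ht
  simp [ht]

lemma get?_mixed (i : Int) (row part : List Char) (a b : Int) :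
    (PySem.Dict.mk (rowItems (i-1) 0 row ++ rowItems i 0 part) : PySem.Dict (Int × Int) Char).get? (a, b)
      = if a = i - 1 ∧ 0 ≤ b ∧ b < row.length then some (row.getD b.toNat ' ')
        else if a = i ∧ 0 ≤ b ∧ b < part.length then some (part.getD b.toNat ' ') else none := by
  rw [get?_rowItems_append]
  by_cases h1 : a = i - 1 ∧ 0 ≤ b ∧ b < row.length
  · rw [if_pos ⟨h1.1, h1.2.1, by omega⟩, if_pos h1]
    simp
  · rw [if_neg (by rintro ⟨x1, x2, x3⟩; exact h1 ⟨x1, x2, by omega⟩), if_neg h1]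
    have : rowItems i 0 part = rowItems i 0 part ++ [] := by simp
    rw [this, get?_rowItems_append]
    by_cases h2 : a = i ∧ 0 ≤ b ∧ b < part.length
    · rw [if_pos ⟨h2.1, h2.2.1, by omega⟩, if_pos h2]
      simp
    · rw [if_neg (by rintro ⟨x1, x2, x3⟩; exact h2 ⟨x1, x2, by omega⟩), if_neg h2]
      rfl

lemma inner1_aux (i : Int) (row : List Char) (n : Nat) (hn : row.length = n) :
    ∀ (fuel : Nat) (j : Nat), n - j = fuel → j ≤ n →
    List.foldl
      (fun fp jj =>
        if (trapCheck (List.foldl (fun ns a => ns ++ [((i, jj).1 + a.1, (i, jj).2 + a.2)]) []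
              ([(-1, -1), (-1, 0), (-1, 1)] : List (Int × Int))) fp == 1) = true
        then fp.insert (i, jj) '^' else fp.insert (i, jj) '.')
      (PySem.Dict.mk (rowItems (i-1) 0 row ++ rowItems i 0 ((nextRow row).take j)))
      (PySem.List.pyRange (j : Int) (n : Int))
    = PySem.Dict.mk (rowItems (i-1) 0 row ++ rowItems i 0 (nextRow row)) := by
  intro fuel
  induction fuel with
  | zero =>
    intro j hf hj
    have hj' : j = n := by omega
    subst hj'
    rw [PySem.List.pyRange_one_eq_nil (by omega), List.foldl_nil,
        List.take_of_length_le (by rw [nextRow_length, hn])]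
  | succ fuel ih =>
    intro j hf hj
    have hjn : j < n := by omega
    rw [PySem.List.pyRange_one_cons (by exact_mod_cast hjn), List.foldl_cons]
    have hnb : List.foldl (fun ns (a : Int × Int) => ns ++ [((i, (j:Int)).1 + a.1, (i, (j:Int)).2 + a.2)]) []
          ([(-1, -1), (-1, 0), (-1, 1)] : List (Int × Int))
        = [(i - 1, (j:Int) - 1), (i - 1, (j:Int)), (i - 1, (j:Int) + 1)] := by
      simp [List.foldl]
      omega
    rw [hnb]
    have hc : (PySem.Dict.mk (rowItems (i-1) 0 row ++ rowItems i 0 ((nextRow row).take j)) :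
          PySem.Dict (Int × Int) Char).get? (i - 1, (j:Int)) = some (row.getD j ' ') := by
      rw [get?_mixed, if_pos ⟨rfl, by omega, by rw [hn]; exact_mod_cast hjn⟩]
      simp
    rw [trapCheck_eq_pureCount _ _ _ _ _ hc]
    have hl : ((PySem.Dict.mk (rowItems (i-1) 0 row ++ rowItems i 0 ((nextRow row).take j)) :
          PySem.Dict (Int × Int) Char).get? (i - 1, (j:Int) - 1)).getD '.'
        = (if 0 < j then row.getD (j - 1) ' ' else '.') := by
      rw [get?_mixed]
      by_cases h0 : 0 < j
      · rw [if_pos ⟨rfl, by omega, by rw [hn]; omega⟩, if_pos h0]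
        have : ((j:Int) - 1).toNat = j - 1 := by omega
        simp [this]
      · rw [if_neg (by rintro ⟨-, x2, -⟩; omega), if_neg (by rintro ⟨x1, -, -⟩; omega), if_neg h0]
        rfl
    have hr : ((PySem.Dict.mk (rowItems (i-1) 0 row ++ rowItems i 0 ((nextRow row).take j)) :
          PySem.Dict (Int × Int) Char).get? (i - 1, (j:Int) + 1)).getD '.'
        = (if j < row.length - 1 then row.getD (j + 1) ' ' else '.') := by
      rw [get?_mixed]
      by_cases h0 : j < row.length - 1
      · rw [if_pos ⟨rfl, by omega, by rw [hn] at h0 ⊢; omega⟩, if_pos h0]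
        have : ((j:Int) + 1).toNat = j + 1 := by omega
        simp [this]
      · rw [if_neg (by rintro ⟨-, -, x3⟩; rw [hn] at h0; omega),
            if_neg (by rintro ⟨x1, -, -⟩; omega), if_neg h0]
        rfl
    rw [hl, hr]
    have hcell : (if (pureCount (if 0 < j then row.getD (j - 1) ' ' else '.') (row.getD j ' ')
            (if j < row.length - 1 then row.getD (j + 1) ' ' else '.') == 1) = true
          then (PySem.Dict.mk (rowItems (i-1) 0 row ++ rowItems i 0 ((nextRow row).take j)) :
              PySem.Dict (Int × Int) Char).insert (i, (j:Int)) '^'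
          else (PySem.Dict.mk (rowItems (i-1) 0 row ++ rowItems i 0 ((nextRow row).take j)) :
              PySem.Dict (Int × Int) Char).insert (i, (j:Int)) '.')
        = (PySem.Dict.mk (rowItems (i-1) 0 row ++ rowItems i 0 ((nextRow row).take j)) :
              PySem.Dict (Int × Int) Char).insert (i, (j:Int)) (bcell row j) := by
      rw [← apply_ite ((PySem.Dict.mk (rowItems (i-1) 0 row ++ rowItems i 0 ((nextRow row).take j)) :
              PySem.Dict (Int × Int) Char).insert (i, (j:Int)))]
      congr 1
      simp only [pureCount_one, bcell]
    rw [hcell]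
    have hfresh : (PySem.Dict.mk (rowItems (i-1) 0 row ++ rowItems i 0 ((nextRow row).take j)) :
          PySem.Dict (Int × Int) Char).contains (i, (j:Int)) = false := by
      rw [PySem.Dict.contains_eq_isSome_get?, get?_mixed,
          if_neg (by rintro ⟨x1, -, -⟩; omega),
          if_neg (by
            rintro ⟨-, -, x3⟩
            rw [List.length_take, nextRow_length, hn] at x3
            omega)]
      rfl
    have hins : (PySem.Dict.mk (rowItems (i-1) 0 row ++ rowItems i 0 ((nextRow row).take j)) :
          PySem.Dict (Int × Int) Char).insert (i, (j:Int)) (bcell row j)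
        = PySem.Dict.mk (rowItems (i-1) 0 row ++ rowItems i 0 ((nextRow row).take (j + 1))) := by
      apply PySem.Dict.ext
      rw [PySem.Dict.items_insert_of_not_contains _ _ hfresh]
      show (rowItems (i-1) 0 row ++ rowItems i 0 ((nextRow row).take j)) ++ [((i, (j:Int)), bcell row j)] = _
      rw [List.append_assoc]
      congr 1
      have htake : (nextRow row).take (j + 1) = (nextRow row).take j ++ [bcell row j] := by
        rw [List.take_add_one]
        congr 1
        rw [nextRow_eq_map_bcell]
        rw [List.getElem?_map]
        rw [List.getElem?_range (by omega : j < row.length)]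
        rfl
      rw [htake, rowItems_append_singleton]
      congr 2
      rw [List.length_take, nextRow_length, hn]
      simp
      omega
    rw [hins]
    have : ((j:Int) + 1) = ((j + 1 : Nat) : Int) := by push_cast; ring
    rw [this]
    exact ih (j + 1) (by omega) (by omega)

lemma loop2_aux (i : Int) (tail : List ((Int × Int) × Char)) (htail : ∀ p ∈ tail, p.1.1 = i) (n : Nat) :
    ∀ (row : List Char) (k : Nat) (r : Int), k + row.length = n →
    List.foldl
      (fun (rf : Int × PySem.Dict (Int × Int) Char) kk =>
        ((if (rf.2.getD (i - 1, kk) ' ' == '.') = true then rf.1 + 1 else rf.1), rf.2.erase (i - 1, kk)))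
      (r, PySem.Dict.mk (rowItems (i-1) (k : Int) row ++ tail))
      (PySem.List.pyRange (k : Int) (n : Int))
    = (r + (List.count '.' row : Int), PySem.Dict.mk tail) := by
  intro row
  induction row with
  | nil =>
    intro k r hk
    simp at hk
    subst hk
    rw [PySem.List.pyRange_one_eq_nil (by omega), List.foldl_nil]
    simp [rowItems]
  | cons c rest ih =>
    intro k r hk
    have hkn : k < n := by simp at hk; omega
    rw [PySem.List.pyRange_one_cons (by exact_mod_cast hkn), List.foldl_cons]
    have hget : (PySem.Dict.mk (rowItems (i-1) (k : Int) (c :: rest) ++ tail) :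
          PySem.Dict (Int × Int) Char).getD (i - 1, (k:Int)) ' ' = c := by
      rw [PySem.Dict.getD_eq_get?_getD, get?_rowItems_append,
          if_pos ⟨rfl, le_refl _, by omega⟩]
      simp
    rw [hget]
    have herase : (PySem.Dict.mk (rowItems (i-1) (k : Int) (c :: rest) ++ tail) :
          PySem.Dict (Int × Int) Char).erase (i - 1, (k:Int))
        = PySem.Dict.mk (rowItems (i-1) ((k:Int) + 1) rest ++ tail) := by
      apply PySem.Dict.ext
      show List.filter _ _ = _
      rw [rowItems, List.cons_append, List.filter_cons]
      have hbeq : (!((i - 1, (k:Int)) == (i - 1, (k:Int)))) = false := by simp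
      rw [hbeq]
      simp only [Bool.false_eq_true, if_false]
      apply List.filter_eq_self.mpr
      intro p hp
      rcases List.mem_append.mp hp with h | h
      · obtain ⟨t, -, hpt⟩ := rowItems_fst_mem _ _ _ _ h
        simp [hpt]
        intro h1
        omega
      · have := htail p h
        simp
        intro h1
        rw [h1] at this
        omega
    rw [herase]
    have hstep : (if (c == '.') = true then r + 1 else r) + (List.count '.' rest : Int)
        = r + (List.count '.' (c :: rest) : Int) := by
      rw [List.count_cons]
      by_cases hcc : c = '.'
      · rw [if_pos (by simp [hcc]), if_pos (by simp [hcc])]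
        push_cast
        ring
      · rw [if_neg (by simpa using hcc), if_neg (by simpa using hcc)]
        push_cast
        ring
    have hcast : ((k:Int) + 1) = ((k + 1 : Nat) : Int) := by push_cast; ring
    rw [hcast]
    rw [ih (k + 1) (if (c == '.') = true then r + 1 else r) (by simp at hk ⊢; omega)]
    rw [hstep]

lemma outer_aux (rows : Int) (n : Nat) :
    ∀ (fuel : Nat) (t : Int) (row : List Char) (r : Int), row.length = n → (rows - t).toNat = fuel →
    List.foldl (fun (racc : Int) (v : Char) => if (v == '.') = true then racc + 1 else racc)
      (List.foldl
        (fun (st : PySem.Dict (Int × Int) Char × Int) i =>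
          ((List.foldl
              (fun (rf : Int × PySem.Dict (Int × Int) Char) k =>
                ((if (rf.2.getD (i - 1, k) ' ' == '.') = true then rf.1 + 1 else rf.1), rf.2.erase (i - 1, k)))
              (st.2, List.foldl
                (fun fp j =>
                  if (trapCheck (List.foldl (fun ns a => ns ++ [((i, j).1 + a.1, (i, j).2 + a.2)]) []
                        ([(-1, -1), (-1, 0), (-1, 1)] : List (Int × Int))) fp == 1) = true
                  then fp.insert (i, j) '^' else fp.insert (i, j) '.')
                st.1 (PySem.List.pyRange 0 (n : Int)))
              (PySem.List.pyRange 0 (n : Int))).2,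
           (List.foldl
              (fun (rf : Int × PySem.Dict (Int × Int) Char) k =>
                ((if (rf.2.getD (i - 1, k) ' ' == '.') = true then rf.1 + 1 else rf.1), rf.2.erase (i - 1, k)))
              (st.2, List.foldl
                (fun fp j =>
                  if (trapCheck (List.foldl (fun ns a => ns ++ [((i, j).1 + a.1, (i, j).2 + a.2)]) []
                        ([(-1, -1), (-1, 0), (-1, 1)] : List (Int × Int))) fp == 1) = true
                  then fp.insert (i, j) '^' else fp.insert (i, j) '.')
                st.1 (PySem.List.pyRange 0 (n : Int)))
              (PySem.List.pyRange 0 (n : Int))).1))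
        (PySem.Dict.mk (rowItems (t-1) 0 row), r) (PySem.List.pyRange t rows)).2
      (List.foldl
        (fun (st : PySem.Dict (Int × Int) Char × Int) i =>
          ((List.foldl
              (fun (rf : Int × PySem.Dict (Int × Int) Char) k =>
                ((if (rf.2.getD (i - 1, k) ' ' == '.') = true then rf.1 + 1 else rf.1), rf.2.erase (i - 1, k)))
              (st.2, List.foldl
                (fun fp j =>
                  if (trapCheck (List.foldl (fun ns a => ns ++ [((i, j).1 + a.1, (i, j).2 + a.2)]) []
                        ([(-1, -1), (-1, 0), (-1, 1)] : List (Int × Int))) fp == 1) = true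
                  then fp.insert (i, j) '^' else fp.insert (i, j) '.')
                st.1 (PySem.List.pyRange 0 (n : Int)))
              (PySem.List.pyRange 0 (n : Int))).2,
           (List.foldl
              (fun (rf : Int × PySem.Dict (Int × Int) Char) k =>
                ((if (rf.2.getD (i - 1, k) ' ' == '.') = true then rf.1 + 1 else rf.1), rf.2.erase (i - 1, k)))
              (st.2, List.foldl
                (fun fp j =>
                  if (trapCheck (List.foldl (fun ns a => ns ++ [((i, j).1 + a.1, (i, j).2 + a.2)]) []
                        ([(-1, -1), (-1, 0), (-1, 1)] : List (Int × Int))) fp == 1) = true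
                  then fp.insert (i, j) '^' else fp.insert (i, j) '.')
                st.1 (PySem.List.pyRange 0 (n : Int)))
              (PySem.List.pyRange 0 (n : Int))).1))
        (PySem.Dict.mk (rowItems (t-1) 0 row), r) (PySem.List.pyRange t rows)).1.values
    = (List.foldl
        (fun (st : List Char × Int) (_ : Int) =>
          (nextRow st.1, st.2 + (List.count '.' (nextRow st.1) : Int)))
        (row, r + (List.count '.' row : Int)) (PySem.List.pyRange t rows)).2 := by
  intro fuel
  induction fuel with
  | zero =>
    intro t row r hlen hf
    rw [PySem.List.pyRange_one_eq_nil (show rows ≤ t by omega), List.foldl_nil, List.foldl_nil]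
    show List.foldl _ r ((rowItems (t-1) 0 row).map (·.2)) = r + (List.count '.' row : Int)
    rw [values_rowItems, PySem.List.foldl_beq_add_one]
  | succ fuel ih =>
    intro t row r hlen hf
    rw [PySem.List.pyRange_one_cons (show t < rows by omega)]
    rw [List.foldl_cons, List.foldl_cons]
    dsimp only
    have h1 : List.foldl
        (fun fp j =>
          if (trapCheck (List.foldl (fun ns (a : Int × Int) => ns ++ [(t + a.1, j + a.2)]) []
                ([(-1, -1), (-1, 0), (-1, 1)] : List (Int × Int))) fp == 1) = true
          then fp.insert (t, j) '^' else fp.insert (t, j) '.')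
        (PySem.Dict.mk (rowItems (t-1) 0 row))
        (PySem.List.pyRange 0 (n : Int))
      = PySem.Dict.mk (rowItems (t-1) 0 row ++ rowItems t 0 (nextRow row)) := by
      have h0 := inner1_aux t row n hlen n 0 (by omega) (by omega)
      rw [Nat.cast_zero] at h0
      rw [show rowItems t 0 ((nextRow row).take 0) = [] from rfl, List.append_nil] at h0
      exact h0
    rw [h1]
    have h2 := loop2_aux t (rowItems t 0 (nextRow row))
        (by
          intro p hp
          obtain ⟨sx, -, hps⟩ := rowItems_fst_mem _ _ _ _ hp
          rw [hps])
        n row 0 r (by omega)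
    rw [Nat.cast_zero] at h2
    rw [h2]
    dsimp only
    have ih' := ih (t + 1) (nextRow row) (r + (List.count '.' row : Int))
        ((nextRow_length row).trans hlen) (by omega)
    rw [show t + 1 - 1 = t by ring] at ih'
    exact ih'

-- ===== the bitmask side =====

-- bitsOf p row: bit j set iff p (row[j])
def bitsOf (p : Char → Bool) : List Char → Nat
  | [] => 0
  | c :: rest => (if p c then 1 else 0) + 2 * bitsOf p rest

lemma testBit_bitsOf (p : Char → Bool) (row : List Char) (j : Nat) :
    (bitsOf p row).testBit j = (decide (j < row.length) && p (row.getD j ' ')) := by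
  induction row generalizing j with
  | nil => simp [bitsOf]
  | cons c rest ih =>
    cases j with
    | zero =>
      rw [bitsOf, Nat.testBit_zero]
      by_cases h : p c <;> simp [h] <;> omega
    | succ j =>
      rw [bitsOf, Nat.testBit_succ]
      have hdiv : ((if p c then 1 else 0) + 2 * bitsOf p rest) / 2 = bitsOf p rest := by
        split_ifs <;> omega
      rw [hdiv, ih]
      simp

lemma popcount_zero : popcount 0 = 0 := by rw [popcount]; simp

lemma popcount_step (b B : Nat) (hb : b ≤ 1) : popcount (b + 2 * B) = b + popcount B := by
  by_cases h : b + 2 * B = 0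
  · have hb0 : b = 0 := by omega
    have hB0 : B = 0 := by omega
    rw [hb0, hB0]
    simp [popcount_zero]
  · rw [popcount, dif_neg h]
    have h1 : (b + 2 * B) % 2 = b := by omega
    have h2 : (b + 2 * B) / 2 = B := by omega
    rw [h1, h2]

lemma popcount_bitsOf (p : Char → Bool) (row : List Char) :
    popcount (bitsOf p row) = row.countP p := by
  induction row with
  | nil => simp [bitsOf, popcount_zero]
  | cons c rest ih =>
    rw [bitsOf, popcount_step _ _ (by split_ifs <;> omega), ih, List.countP_cons]
    by_cases h : p c <;> simp [h] <;> omega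

lemma build_TS (row : List Char) :
    row.reverse.foldl
      (fun (TS : Nat × Nat) c =>
        (2 * TS.1 + (if c == '^' then 1 else 0), 2 * TS.2 + (if c == '.' then 1 else 0))) (0, 0)
    = (bitsOf (· == '^') row, bitsOf (· == '.') row) := by
  rw [List.foldl_reverse]
  induction row with
  | nil => rfl
  | cons c rest ih =>
    rw [List.foldr_cons, ih, bitsOf, bitsOf]
    refine congrArg₂ _ (by ring) (by ring)

lemma bcell_cases (row : List Char) (j : Nat) : bcell row j = '^' ∨ bcell row j = '.' := by
  unfold bcell
  dsimp only
  split_ifs <;> simp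

lemma getD_nextRow (row : List Char) (j : Nat) (hj : j < row.length) :
    (nextRow row).getD j ' ' = bcell row j := by
  rw [nextRow_eq_map_bcell]
  simp [List.getD, List.getElem?_map, List.getElem?_range hj]

lemma bcell_eq_hat (row : List Char) (j : Nat) :
    (bcell row j == '^')
      = ((row.getD j ' ' == '.' || row.getD j ' ' == '^') &&
          ((((if 0 < j then row.getD (j - 1) ' ' else '.') == '^') &&
              ((if j < row.length - 1 then row.getD (j + 1) ' ' else '.') == '.'))
            != (((if j < row.length - 1 then row.getD (j + 1) ' ' else '.') == '^') &&
              ((if 0 < j then row.getD (j - 1) ' ' else '.') == '.')))) := by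
  unfold bcell
  dsimp only
  set L := (if 0 < j then row.getD (j - 1) ' ' else '.') with hL
  set R := (if j < row.length - 1 then row.getD (j + 1) ' ' else '.') with hR
  by_cases h : ((row.getD j ' ' == '.' || row.getD j ' ' == '^') &&
      (((L == '^') && (R == '.')) != ((R == '^') && (L == '.')))) = true
  · rw [if_pos h, h]; rfl
  · rw [if_neg h]
    simp only [Bool.not_eq_true] at h
    rw [h]; rfl

lemma one_shl (n : Nat) : (1 : Nat) <<< n = 2 ^ n := by rw [Nat.shiftLeft_eq, one_mul]

lemma testBit_mask (n j : Nat) : ((1 <<< n) - 1).testBit j = decide (j < n) := by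
  rw [one_shl, Nat.testBit_two_pow_sub_one]

lemma testBit_one' (j : Nat) : (1 : Nat).testBit j = decide (0 = j) := by
  rw [show (1 : Nat) = 2 ^ 0 by norm_num, Nat.testBit_two_pow]

lemma bitNext_eq (row : List Char) :
    (((bitsOf (· == '.') row) ||| (bitsOf (· == '^') row)) &&&
      ((((bitsOf (· == '^') row <<< 1) &&& ((1 <<< row.length) - 1)) &&&
          ((bitsOf (· == '.') row >>> 1) ||| (if row.length ≠ 0 then 1 <<< (row.length - 1) else 0))) ^^^
        ((bitsOf (· == '^') row >>> 1) &&&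
          (((bitsOf (· == '.') row <<< 1) ||| 1) &&& ((1 <<< row.length) - 1))))) &&&
      ((1 <<< row.length) - 1)
    = bitsOf (· == '^') (nextRow row) := by
  apply Nat.eq_of_testBit_eq
  intro j
  by_cases hn0 : row.length = 0
  · rcases List.length_eq_zero_iff.mp hn0 with rfl
    simp [bitsOf, nextRow]
  rw [if_pos hn0]
  simp only [testBit_mask, Nat.testBit_land, Nat.testBit_or, Nat.testBit_xor,
    Nat.testBit_shiftLeft, Nat.testBit_shiftRight, testBit_one', testBit_bitsOf]
  by_cases hj : j < row.length
  · rw [nextRow_length, decide_eq_true hj, getD_nextRow row j hj, bcell_eq_hat]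
    by_cases hj0 : 0 < j
    · by_cases hj1 : j < row.length - 1
      · rw [if_pos hj0, if_pos hj1,
            decide_eq_true (show j ≥ 1 by omega),
            decide_eq_true (show j - 1 < row.length by omega),
            decide_eq_true (show 1 + j < row.length by omega),
            decide_eq_false (show ¬(j ≥ row.length - 1) by omega),
            decide_eq_false (show ¬(0 = j) by omega),
            show 1 + j = j + 1 by omega]
        cases h1 : (row.getD j ' ' == '.') <;> cases h2 : (row.getD j ' ' == '^') <;>
          cases h3 : (row.getD (j-1) ' ' == '.') <;> cases h4 : (row.getD (j-1) ' ' == '^') <;>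
          cases h5 : (row.getD (j+1) ' ' == '.') <;> cases h6 : (row.getD (j+1) ' ' == '^') <;> rfl
      · rw [if_pos hj0, if_neg hj1,
            decide_eq_true (show j ≥ 1 by omega),
            decide_eq_true (show j - 1 < row.length by omega),
            decide_eq_false (show ¬(1 + j < row.length) by omega),
            decide_eq_true (show j ≥ row.length - 1 by omega),
            decide_eq_true (show 0 = j - (row.length - 1) by omega),
            decide_eq_false (show ¬(0 = j) by omega)]
        cases h1 : (row.getD j ' ' == '.') <;> cases h2 : (row.getD j ' ' == '^') <;>
          cases h3 : (row.getD (j-1) ' ' == '.') <;> cases h4 : (row.getD (j-1) ' ' == '^') <;> rfl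
    · have hj0' : j = 0 := by omega
      subst hj0'
      by_cases hj1 : 0 < row.length - 1
      · rw [if_neg (by omega), if_pos hj1,
            decide_eq_false (show ¬((0:Nat) ≥ 1) by omega),
            decide_eq_true (show 1 + 0 < row.length by omega),
            decide_eq_false (show ¬((0:Nat) ≥ row.length - 1) by omega),
            decide_eq_true (show (0:Nat) = 0 from rfl),
            show (1:Nat) + 0 = 0 + 1 by omega]
        cases h1 : (row.getD 0 ' ' == '.') <;> cases h2 : (row.getD 0 ' ' == '^') <;>
          cases h5 : (row.getD (0+1) ' ' == '.') <;> cases h6 : (row.getD (0+1) ' ' == '^') <;> rfl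
      · rw [if_neg (by omega), if_neg hj1,
            decide_eq_false (show ¬((0:Nat) ≥ 1) by omega),
            decide_eq_false (show ¬(1 + 0 < row.length) by omega),
            decide_eq_true (show (0:Nat) ≥ row.length - 1 by omega),
            decide_eq_true (show (0:Nat) = 0 - (row.length - 1) by omega),
            decide_eq_true (show (0:Nat) = 0 from rfl)]
        cases h1 : (row.getD 0 ' ' == '.') <;> cases h2 : (row.getD 0 ' ' == '^') <;> rfl
  · rw [nextRow_length, decide_eq_false hj]
    simp

lemma mask_xor_eq (row : List Char) :
    ((1 <<< row.length) - 1) ^^^ bitsOf (· == '^') (nextRow row)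
      = bitsOf (· == '.') (nextRow row) := by
  apply Nat.eq_of_testBit_eq
  intro j
  rw [Nat.testBit_xor, one_shl, Nat.testBit_two_pow_sub_one, testBit_bitsOf, testBit_bitsOf,
      nextRow_length]
  by_cases hj : j < row.length
  · rw [decide_eq_true hj, getD_nextRow row j hj]
    rcases bcell_cases row j with h | h <;> rw [h] <;> rfl
  · rw [decide_eq_false hj]; rfl

lemma countP_split (l : List Char) (h : ∀ c ∈ l, c = '^' ∨ c = '.') :
    l.countP (· == '.') + l.countP (· == '^') = l.length := by
  induction l with
  | nil => rfl
  | cons c rest ih =>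
    rw [List.countP_cons, List.countP_cons, List.length_cons]
    have hr := ih (fun x hx => h x (List.mem_cons_of_mem _ hx))
    rcases h c (List.mem_cons_self) with hc | hc <;> rw [hc] <;> simp <;> omega

lemma count_dot_nextRow (row : List Char) :
    (row.length : Int) - (popcount (bitsOf (· == '^') (nextRow row)) : Int)
      = (List.count '.' (nextRow row) : Int) := by
  rw [popcount_bitsOf]
  have hb : ∀ c ∈ nextRow row, c = '^' ∨ c = '.' := by
    rw [nextRow_eq_map_bcell]
    intro c hc
    obtain ⟨t, -, rfl⟩ := List.mem_map.mp hc
    exact bcell_cases row t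
  have hs := countP_split (nextRow row) hb
  have hc : List.count '.' (nextRow row) = (nextRow row).countP (· == '.') := rfl
  rw [hc]
  have hl := nextRow_length row
  omega

lemma bit_fold (rows : Int) (n : Nat) :
    ∀ (fuel : Nat) (t : Int) (row : List Char) (r : Int), row.length = n → (rows - t).toNat = fuel →
    ((PySem.List.pyRange t rows).foldl
        (fun (st : Nat × Nat × Int) _ =>
          let T := st.1
          let S := st.2.1
          let lT := (T <<< 1) &&& ((1 <<< n) - 1)
          let lS := ((S <<< 1) ||| 1) &&& ((1 <<< n) - 1)
          let rT := T >>> 1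
          let rS := (S >>> 1) ||| (if n ≠ 0 then 1 <<< (n - 1) else 0)
          let T' := ((S ||| T) &&& ((lT &&& rS) ^^^ (rT &&& lS))) &&& ((1 <<< n) - 1)
          (T', ((1 <<< n) - 1) ^^^ T', st.2.2 + ((n : Int) - (popcount T' : Int))))
        (bitsOf (· == '^') row, bitsOf (· == '.') row, r)).2.2
    = ((PySem.List.pyRange t rows).foldl
        (fun (st : List Char × Int) (_ : Int) =>
          (nextRow st.1, st.2 + (List.count '.' (nextRow st.1) : Int)))
        (row, r)).2 := by
  intro fuel
  induction fuel with
  | zero =>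
    intro t row r hlen hf
    rw [PySem.List.pyRange_one_eq_nil (show rows ≤ t by omega), List.foldl_nil, List.foldl_nil]
  | succ fuel ih =>
    intro t row r hlen hf
    rw [PySem.List.pyRange_one_cons (show t < rows by omega), List.foldl_cons, List.foldl_cons]
    dsimp only
    rw [← hlen]
    rw [bitNext_eq row, mask_xor_eq row, count_dot_nextRow row]
    rw [hlen]
    exact ih (t + 1) (nextRow row) (r + (List.count '.' (nextRow row) : Int))
      ((nextRow_length row).trans hlen) (by omega)

lemma count_eq_countP_dot (l : List Char) : List.count '.' l = l.countP (· == '.') := by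
  rfl

-- ===== VERDICT (by name: the statement is the Claim_ definition above) =====
theorem calculate_py_spec : Claim_equal_calculate_py := by
  intro data rows _ _
  unfold Spec_calculate_py calculate_py calculate_py_alt
  simp only [createFloorPlan_eq]
  rw [show PySem.Str.len ((PySem.List.pyGet? (PySem.Str.splitlines data) 0).getD "")
      = ((((PySem.List.pyGet? (PySem.Str.splitlines data) 0).getD "").toList.length : Nat) : Int) by simp]
  have H := outer_aux rows (((PySem.List.pyGet? (PySem.Str.splitlines data) 0).getD "").toList.length)
      ((rows - 1).toNat) 1 ((PySem.List.pyGet? (PySem.Str.splitlines data) 0).getD "").toList 0 rfl rfl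
  rw [show (1:Int) - 1 = 0 by norm_num, zero_add] at H
  refine H.trans ?_
  have hb := bit_fold rows (((PySem.List.pyGet? (PySem.Str.splitlines data) 0).getD "").toList.length)
      ((rows - 1).toNat) 1 ((PySem.List.pyGet? (PySem.Str.splitlines data) 0).getD "").toList
      ((List.count '.' ((PySem.List.pyGet? (PySem.Str.splitlines data) 0).getD "").toList : Nat) : Int) rfl rfl
  refine Eq.trans (Eq.symm hb) ?_
  show _ = (((PySem.List.pyRange 1 rows).foldl _
      ((((PySem.List.pyGet? (PySem.Str.splitlines data) 0).getD "").toList.reverse.foldl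
        (fun (TS : Nat × Nat) c =>
          (2 * TS.1 + (if c == '^' then 1 else 0), 2 * TS.2 + (if c == '.' then 1 else 0))) (0, 0)).1,
        _, _)) : Nat × Nat × Int).2.2
  rw [build_TS]
  rw [popcount_bitsOf, ← count_eq_countP_dot]
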